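-- pv_equiv track=rewrite | github.com/dancwilliams/random-scripts | subnet_cruncher/subnet_cruncher/main.py | subnet_crunch
-- ===== SOURCE A (Python) =====
-- def subnet_crunch(cidr_list):
--
--     while len(cidr_list) != len(set(cidr_list)):
--
--         for i in cidr_list:
--             count = cidr_list.count(i)
--             if count >= 2:
--                 cidr_list.remove(i)
--                 cidr_list.remove(i)
--                 new = i - 1
--                 cidr_list.append(new)
--
--     cidr_list.sort()
--     return(cidr_list)
-- ===== SOURCE B (Python) =====
-- def subnet_crunch(cidr_list):
--     # Count each value once, then do a binary-style carry sweep from the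
--     # largest value downward: 2k copies of v collapse to k copies of v-1.
--     # Mutates cidr_list in place (like A) and returns it.
--     cnt = {}
--     for v in cidr_list:
--         cnt[v] = cnt.get(v, 0) + 1
--     out = []
--     carry = 0
--     cv = 0
--     for v in sorted(cnt, reverse=True):
--         while carry > 0 and cv > v:
--             if carry % 2:
--                 out.append(cv)
--             carry //= 2
--             cv -= 1
--         c = cnt[v] + carry
--         if c % 2:
--             out.append(v)
--         carry = c // 2
--         cv = v - 1
--     while carry > 0:
--         if carry % 2:
--             out.append(cv)
--         carry //= 2
--         cv -= 1
--     out.reverse()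
--     cidr_list[:] = out
--     return cidr_list
-- ===== Notes on version B (the rewrite author's own statement) =====
-- stated objective: faster
-- what changed: Instead of repeatedly rescanning and mutating the list (while-loop over count/remove/remove/append passes), B counts each value once and performs a single binary-style carry sweep over the distinct values from largest to smallest (2k copies of v collapse to k copies of v-1), then reverses the emitted digits.
import Mathlib
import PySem

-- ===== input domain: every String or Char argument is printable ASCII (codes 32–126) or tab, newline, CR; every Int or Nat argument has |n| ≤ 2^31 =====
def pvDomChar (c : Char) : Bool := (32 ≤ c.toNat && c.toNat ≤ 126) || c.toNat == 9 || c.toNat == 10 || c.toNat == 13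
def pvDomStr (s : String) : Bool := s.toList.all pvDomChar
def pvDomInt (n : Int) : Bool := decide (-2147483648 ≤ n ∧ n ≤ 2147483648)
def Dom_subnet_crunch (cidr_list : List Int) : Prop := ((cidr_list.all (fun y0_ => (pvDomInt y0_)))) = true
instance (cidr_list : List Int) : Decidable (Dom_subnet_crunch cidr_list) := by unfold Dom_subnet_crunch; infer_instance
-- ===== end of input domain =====

-- B replaces A's repeated rescan-and-mutate passes by one counting pass plus a single binary-style
-- carry sweep over the distinct values from largest to smallest (2k copies of v collapse to k copies
-- of v-1); asymptotically faster. Both A and B mutate cidr_list in place; the equivalence proved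
-- here is about the RETURN value (B performs the same final in-place assignment).


-- ===== PORT A =====

-- `for i in cidr_list:` over a list that the body mutates: CPython fetches by an internal index k
-- (stop when k ≥ current length, fetch i = lst[k], k += 1, run body).  Exact transliteration.
-- `cidr_list.remove(i)` (first occurrence; here i is present since its count is ≥ 2, so the
-- `.getD lst` default of remove? is never used and the step is exact).  fuel is only a totality
-- guard: the loop runs at most lst.length iterations (each step raises k by 1 and never grows the
-- list), so fuel = lst.length at the call site is never exhausted.
def pvInnerFor (fuel : Nat) (lst : List Int) (k : Nat) : List Int :=
  match fuel with
  | 0 => lst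
  | fuel + 1 =>
    if h : k < lst.length then
      let i := lst[k]
      if 2 ≤ PySem.List.count lst i then
        let l1 := (PySem.List.remove? lst i).getD lst
        let l2 := (PySem.List.remove? l1 i).getD l1
        pvInnerFor fuel (l2 ++ [i - 1]) (k + 1)
      else
        pvInnerFor fuel lst (k + 1)
    else lst

-- `while len(cidr_list) != len(set(cidr_list)):` — structural recursion on a fuel bound; fuel is
-- only a totality guard: every iteration with the condition true shrinks the list by at least one
-- element (proved below in pvWhileGo_nodup), so fuel = the initial length is never exhausted.
def pvWhileGo (fuel : Nat) (lst : List Int) : List Int :=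
  match fuel with
  | 0 => lst
  | fuel + 1 =>
    if lst.length ≠ (PySem.Set.ofList lst).length then pvWhileGo fuel (pvInnerFor lst.length lst 0) else lst

def subnet_crunch (cidr_list : List Int) : List Int :=
  PySem.List.sorted (pvWhileGo cidr_list.length cidr_list) (fun x => x) false

-- ===== PORT B =====

-- halving a positive carry shrinks it (termination of the two carry loops below)
theorem pvHalf_lt {c : Int} (h : 0 < c) : (PySem.Int.floordiv c 2).toNat < c.toNat := by
  rw [PySem.Int.floordiv_eq_ediv_of_pos (by omega : (0:Int) < 2)]
  omega

-- `while carry > 0 and cv > v:` — the inner carry-propagation loop of Source B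
def pvCarryDown (out : List Int) (carry cv v : Int) : List Int × Int × Int :=
  if h : 0 < carry ∧ v < cv then
    pvCarryDown (if PySem.Int.mod carry 2 ≠ 0 then out ++ [cv] else out)
      (PySem.Int.floordiv carry 2) (cv - 1) v
  else (out, carry, cv)
termination_by carry.toNat
decreasing_by
  exact pvHalf_lt h.1

-- `while carry > 0:` — the final drain loop of Source B
def pvDrain (out : List Int) (carry cv : Int) : List Int :=
  if h : 0 < carry then
    pvDrain (if PySem.Int.mod carry 2 ≠ 0 then out ++ [cv] else out)
      (PySem.Int.floordiv carry 2) (cv - 1)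
  else out
termination_by carry.toNat
decreasing_by
  exact pvHalf_lt h

-- literal transliteration of Source B: counting dict, descending key sweep with carries, drain, reverse.
-- `cnt[v]` inside the loop is exact as `cnt.getD v 0` because v is drawn from cnt's keys.
def subnet_crunch_alt (cidr_list : List Int) : List Int :=
  let cnt := cidr_list.foldl (fun d x => d.insert x (d.getD x 0 + 1)) PySem.Dict.empty
  let st := (PySem.List.sorted cnt.keys (fun x => x) true).foldl
    (fun (s : List Int × Int × Int) v =>
      let t := pvCarryDown s.1 s.2.1 s.2.2 v
      let c := cnt.getD v 0 + t.2.1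
      let out := if PySem.Int.mod c 2 ≠ 0 then t.1 ++ [v] else t.1
      (out, PySem.Int.floordiv c 2, v - 1))
    (([] : List Int), (0 : Int), (0 : Int))
  (pvDrain st.1 st.2.1 st.2.2).reverse

-- ===== PRECONDITION & SPEC =====
def Spec_subnet_crunch (cidr_list : List Int) (out : List Int) : Prop := out = subnet_crunch_alt cidr_list
instance (cidr_list : List Int) (out : List Int) : Decidable (Spec_subnet_crunch cidr_list out) := by unfold Spec_subnet_crunch; infer_instance

-- ===== CLAIM (what is proved, stated in full; the proofs are below) =====
def Claim_equal_subnet_crunch : Prop := ∀ (cidr_list : List Int), Dom_subnet_crunch cidr_list → Spec_subnet_crunch cidr_list (subnet_crunch cidr_list)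

-- ===== LEMMAS AND PROOFS =====

-- The weight 2^(-v) of a value: merging two copies of v into one v-1 preserves total weight,
-- and a duplicate-free multiset is determined by its total weight (uniqueness of binary expansion).
def pw (v : Int) : ℚ := (2 : ℚ) ^ (-v)

def wt (l : List Int) : ℚ := (l.map pw).sum

theorem pw_pos (v : Int) : 0 < pw v := zpow_pos (by norm_num) _

theorem pw_pred (v : Int) : pw (v - 1) = 2 * pw v := by
  unfold pw
  rw [neg_sub, sub_eq_add_neg, zpow_add₀ (by norm_num : (2:ℚ) ≠ 0)]
  ring

theorem pw_mono {m v : Int} (h : m ≤ v) : pw v ≤ pw m :=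
  zpow_le_zpow_right₀ (by norm_num) (by omega)

theorem wt_nil : wt [] = 0 := rfl

theorem wt_cons (a : Int) (l : List Int) : wt (a :: l) = pw a + wt l := by
  simp [wt]

theorem wt_append (l₁ l₂ : List Int) : wt (l₁ ++ l₂) = wt l₁ + wt l₂ := by
  simp [wt]

theorem wt_nonneg (l : List Int) : 0 ≤ wt l := by
  induction l with
  | nil => simp [wt_nil]
  | cons a t ih => rw [wt_cons]; have := pw_pos a; linarith

theorem wt_perm {l₁ l₂ : List Int} (h : l₁.Perm l₂) : wt l₁ = wt l₂ :=
  (h.map pw).sum_eq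

theorem wt_erase {v : Int} {l : List Int} (h : v ∈ l) : wt (l.erase v) = wt l - pw v := by
  obtain ⟨l₁, l₂, -, hsplit, herase⟩ := List.exists_erase_eq h
  rw [herase, wt_append]; rw [hsplit, wt_append, wt_cons]; ring

-- a strictly-descending-weight bound: distinct values all above m weigh less than 2^(-m) together
theorem wt_lt_of_forall_gt {l : List Int} {m : Int}
    (hs : l.Pairwise (· < ·)) (hm : ∀ x ∈ l, m < x) : wt l < pw m := by
  induction l generalizing m with
  | nil => simpa [wt_nil] using pw_pos m
  | cons a t ih =>
    have ht : wt t < pw a := ih hs.tail (fun x hx => (List.pairwise_cons.mp hs).1 x hx)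
    have ha : m < a := hm a List.mem_cons_self
    have : pw a ≤ (1/2) * pw m := by
      have := pw_mono (show m + 1 ≤ a by omega)
      have hp : pw (m + 1) = (1/2) * pw m := by
        have := pw_pred (m + 1); simp at this; linarith [this]
      linarith
    rw [wt_cons]
    have := pw_pos m
    linarith

-- uniqueness: two strictly increasing lists with equal weight are equal
theorem wt_inj : ∀ (l₁ l₂ : List Int), l₁.Pairwise (· < ·) → l₂.Pairwise (· < ·) →
    wt l₁ = wt l₂ → l₁ = l₂ := by
  intro l₁
  induction l₁ with
  | nil =>
    intro l₂ _ h₂ hw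
    cases l₂ with
    | nil => rfl
    | cons b t =>
      exfalso
      have := pw_pos b
      have := wt_nonneg t
      rw [wt_nil, wt_cons] at hw
      linarith
  | cons a t ih =>
    intro l₂ h₁ h₂ hw
    cases l₂ with
    | nil =>
      exfalso
      have := pw_pos a
      have := wt_nonneg t
      rw [wt_nil, wt_cons] at hw
      linarith
    | cons b t₂ =>
      rw [wt_cons, wt_cons] at hw
      have hab : a = b := by
        rcases lt_trichotomy a b with hlt | heq | hgt
        · exfalso
          have : wt (b :: t₂) < pw a := wt_lt_of_forall_gt h₂
            (by intro x hx; rcases List.mem_cons.mp hx with rfl | hx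
                · exact hlt
                · exact lt_trans hlt ((List.pairwise_cons.mp h₂).1 x hx))
          rw [wt_cons] at this
          have := wt_nonneg t
          linarith
        · exact heq
        · exfalso
          have : wt (a :: t) < pw b := wt_lt_of_forall_gt h₁
            (by intro x hx; rcases List.mem_cons.mp hx with rfl | hx
                · exact hgt
                · exact lt_trans hgt ((List.pairwise_cons.mp h₁).1 x hx))
          rw [wt_cons] at this
          have := wt_nonneg t₂
          linarith
      subst hab
      rw [ih t₂ h₁.tail h₂.tail (by linarith)]

-- Pairwise ≤ + Nodup → Pairwise <
theorem pairwise_lt_of_le_nodup {l : List Int} (h₁ : l.Pairwise (· ≤ ·)) (h₂ : l.Nodup) :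
    l.Pairwise (· < ·) := by
  have := h₁.and h₂
  exact this.imp (fun {a b} hab => lt_of_le_of_ne hab.1 hab.2)

-- ----- A-side -----

-- the merge step is two erasures plus an append
theorem pvMerge_eq (lst : List Int) (i : Int) (hc : 2 ≤ List.count i lst) :
    (PySem.List.remove? ((PySem.List.remove? lst i).getD lst) i).getD
        ((PySem.List.remove? lst i).getD lst) = (lst.erase i).erase i := by
  have h1 : i ∈ lst := List.count_pos_iff.mp (by omega)
  rw [PySem.List.remove?_eq_some_erase lst i h1, Option.getD_some]
  have hce : List.count i (lst.erase i) = List.count i lst - 1 := List.count_erase_self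
  have h3 : i ∈ lst.erase i := List.count_pos_iff.mp (by omega)
  rw [PySem.List.remove?_eq_some_erase _ i h3, Option.getD_some]

theorem pvMerge_len (lst : List Int) (i : Int) (hc : 2 ≤ List.count i lst) :
    ((lst.erase i).erase i ++ [i - 1]).length + 1 = lst.length := by
  have h1 : i ∈ lst := List.count_pos_iff.mp (by omega)
  have hce : List.count i (lst.erase i) = List.count i lst - 1 := List.count_erase_self
  have h3 : i ∈ lst.erase i := List.count_pos_iff.mp (by omega)
  have h7 : List.count i lst ≤ lst.length := List.count_le_length
  simp [h1, h3]
  omega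

-- length never grows
theorem pvInnerFor_len_le (fuel : Nat) : ∀ (lst : List Int) (k : Nat),
    (pvInnerFor fuel lst k).length ≤ lst.length := by
  induction fuel with
  | zero => intro lst k; exact le_refl _
  | succ fuel ih =>
    intro lst k
    simp only [pvInnerFor]
    split
    · rename_i h
      split
      · rename_i hc
        have hc' : 2 ≤ List.count lst[k] lst := by simpa [PySem.List.count_eq] using hc
        have hm := pvMerge_eq lst lst[k] hc'
        have hl := pvMerge_len lst lst[k] hc'
        have := ih (((PySem.List.remove? ((PySem.List.remove? lst lst[k]).getD lst) lst[k]).getD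
          ((PySem.List.remove? lst lst[k]).getD lst)) ++ [lst[k] - 1]) (k + 1)
        rw [hm] at this ⊢
        omega
      · exact ih lst (k + 1)
    · exact le_refl _

-- if some position ≥ k holds a duplicated value and the fuel covers the remaining indices,
-- a merge fires and the length strictly shrinks
theorem pvInnerFor_len_lt (fuel : Nat) : ∀ (lst : List Int) (k : Nat),
    lst.length - k ≤ fuel →
    (∃ j, k ≤ j ∧ ∃ h : j < lst.length, 2 ≤ List.count lst[j] lst) →
    (pvInnerFor fuel lst k).length < lst.length := by
  induction fuel with
  | zero =>
    intro lst k hf hj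
    exfalso
    obtain ⟨j, hkj, hjl, _⟩ := hj
    omega
  | succ fuel ih =>
    intro lst k hf hj
    simp only [pvInnerFor]
    split
    · rename_i h
      split
      · rename_i hc
        have hc' : 2 ≤ List.count lst[k] lst := by simpa [PySem.List.count_eq] using hc
        have hm := pvMerge_eq lst lst[k] hc'
        have hl := pvMerge_len lst lst[k] hc'
        have := pvInnerFor_len_le fuel (((PySem.List.remove? ((PySem.List.remove? lst lst[k]).getD lst) lst[k]).getD
          ((PySem.List.remove? lst lst[k]).getD lst)) ++ [lst[k] - 1]) (k + 1)
        rw [hm] at this ⊢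
        omega
      · rename_i hc
        obtain ⟨j, hkj, hjl, hcj⟩ := hj
        have hjk : j ≠ k := by
          intro he; subst he
          exact hc (by simpa [PySem.List.count_eq] using hcj)
        exact ih lst (k + 1) (by omega) ⟨j, by omega, hjl, hcj⟩
    · rename_i h
      exfalso
      obtain ⟨j, hkj, hjl, _⟩ := hj
      omega

theorem ofList_len_eq_iff (l : List Int) :
    (PySem.Set.ofList l).length = l.length ↔ l.Nodup := by
  have hnd := PySem.Set.nodup_ofList l
  have htf : (PySem.Set.ofList l).toFinset = l.toFinset := by
    ext x; simp [List.mem_toFinset, PySem.Set.mem_ofList]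
  have hcard : (PySem.Set.ofList l).length = l.toFinset.card := by
    rw [← List.toFinset_card_of_nodup hnd, htf]
  rw [hcard]
  constructor
  · intro h
    rw [List.card_toFinset] at h
    rw [← List.Sublist.eq_of_length (List.dedup_sublist l) h]
    exact List.nodup_dedup l
  · intro h
    exact List.toFinset_card_of_nodup h

theorem pvWhile_dec (l : List Int) (h : ¬ l.Nodup) :
    (pvInnerFor l.length l 0).length < l.length := by
  apply pvInnerFor_len_lt l.length l 0 (by omega)
  rw [List.nodup_iff_count_le_one] at h
  push Not at h
  obtain ⟨x, hx⟩ := h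
  have hmem : x ∈ l := List.count_pos_iff.mp (by omega)
  obtain ⟨j, hjl, hje⟩ := List.mem_iff_getElem.mp hmem
  exact ⟨j, Nat.zero_le _, hjl, by rw [hje]; omega⟩


theorem pvInnerFor_wt (fuel : Nat) : ∀ (lst : List Int) (k : Nat),
    wt (pvInnerFor fuel lst k) = wt lst := by
  induction fuel with
  | zero => intro lst k; rfl
  | succ fuel ih =>
    intro lst k
    simp only [pvInnerFor]
    split
    · rename_i h
      split
      · rename_i hc
        have hc' : 2 ≤ List.count lst[k] lst := by simpa [PySem.List.count_eq] using hc
        have hm := pvMerge_eq lst lst[k] hc'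
        have h1 : lst[k] ∈ lst := List.count_pos_iff.mp (by omega)
        have hce : List.count lst[k] (lst.erase lst[k]) = List.count lst[k] lst - 1 :=
          List.count_erase_self
        have h3 : lst[k] ∈ lst.erase lst[k] := List.count_pos_iff.mp (by omega)
        rw [hm, ih, wt_append, wt_erase h3, wt_erase h1, wt_cons, wt_nil, pw_pred]
        ring
      · exact ih lst (k + 1)
    · rfl

theorem pvWhileGo_wt (fuel : Nat) : ∀ l : List Int, wt (pvWhileGo fuel l) = wt l := by
  induction fuel with
  | zero => intro l; rfl
  | succ fuel ih =>
    intro l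
    unfold pvWhileGo
    split
    · rw [ih, pvInnerFor_wt]
    · rfl

theorem pvWhileGo_nodup (fuel : Nat) : ∀ l : List Int, l.length ≤ fuel → (pvWhileGo fuel l).Nodup := by
  induction fuel with
  | zero =>
    intro l hl
    interval_cases h : l.length
    · rw [List.length_eq_zero_iff.mp h]; exact List.nodup_nil
  | succ fuel ih =>
    intro l hl
    unfold pvWhileGo
    split
    · rename_i hcond
      have hnd : ¬ l.Nodup := fun hn => hcond ((ofList_len_eq_iff l).mpr hn).symm
      have := pvWhile_dec l hnd
      exact ih _ (by omega)
    · rename_i hcond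
      simp only [ne_eq, not_not] at hcond
      exact (ofList_len_eq_iff l).mp hcond.symm

theorem subnet_crunch_props (l : List Int) :
    (subnet_crunch l).Pairwise (· < ·) ∧ wt (subnet_crunch l) = wt l := by
  unfold subnet_crunch
  have hperm := PySem.List.sorted_perm (pvWhileGo l.length l) (fun x => x) false
  have hle := PySem.List.sorted_pairwise (pvWhileGo l.length l) (fun x => x)
  have hnd : (PySem.List.sorted (pvWhileGo l.length l) (fun x => x) false).Nodup :=
    hperm.nodup_iff.mpr (pvWhileGo_nodup l.length l le_rfl)
  refine ⟨pairwise_lt_of_le_nodup hle hnd, ?_⟩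
  rw [wt_perm hperm, pvWhileGo_wt]

-- ----- B-side -----

theorem pairwise_gt_append {out : List Int} {c : Int}
    (h : out.Pairwise (· > ·)) (hall : ∀ x ∈ out, c < x) :
    (out ++ [c]).Pairwise (· > ·) := by
  rw [List.pairwise_append]
  exact ⟨h, List.pairwise_singleton _ _, by simpa using hall⟩

-- 2*(c/2) + c%2 = c, over ℚ
theorem carry_split (c : Int) :
    (c : ℚ) = 2 * ((PySem.Int.floordiv c 2 : Int) : ℚ) + ((PySem.Int.mod c 2 : Int) : ℚ) := by
  rw [PySem.Int.floordiv_eq_ediv_of_pos (by omega : (0:Int) < 2),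
      PySem.Int.mod_eq_emod_of_pos (by omega : (0:Int) < 2)]
  have := Int.mul_ediv_add_emod c 2
  linarith [(by exact_mod_cast congrArg (Int.cast : Int → ℚ) this : 2 * ((c/2 : Int):ℚ) + ((c % 2 : Int):ℚ) = (c:ℚ))]

theorem pvCarryDown_spec (out : List Int) (carry cv v : Int)
    (hout : out.Pairwise (· > ·)) (hcv : ∀ x ∈ out, cv < x) (hv : ∀ x ∈ out, v < x)
    (hc : 0 ≤ carry) (hvc : 0 < carry → v ≤ cv) :
    let t := pvCarryDown out carry cv v
    t.1.Pairwise (· > ·) ∧ (∀ x ∈ t.1, v < x) ∧ 0 ≤ t.2.1 ∧ (0 < t.2.1 → t.2.2 = v) ∧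
      wt t.1 + t.2.1 * pw t.2.2 = wt out + carry * pw cv := by
  fun_induction pvCarryDown out carry cv v with
  | case1 out carry cv h ih =>
    have hmod : PySem.Int.mod carry 2 = carry % 2 :=
      PySem.Int.mod_eq_emod_of_pos (by omega : (0:Int) < 2)
    have hdiv : PySem.Int.floordiv carry 2 = carry / 2 :=
      PySem.Int.floordiv_eq_ediv_of_pos (by omega : (0:Int) < 2)
    have hout' : (if PySem.Int.mod carry 2 ≠ 0 then out ++ [cv] else out).Pairwise (· > ·) := by
      split
      · exact pairwise_gt_append hout hcv
      · exact hout
    have hcv' : ∀ x ∈ (if PySem.Int.mod carry 2 ≠ 0 then out ++ [cv] else out), cv - 1 < x := by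
      intro x hx
      split at hx
      · rcases List.mem_append.mp hx with hx | hx
        · have := hcv x hx; omega
        · simp at hx; omega
      · have := hcv x hx; omega
    have hv' : ∀ x ∈ (if PySem.Int.mod carry 2 ≠ 0 then out ++ [cv] else out), v < x := by
      intro x hx
      split at hx
      · rcases List.mem_append.mp hx with hx | hx
        · exact hv x hx
        · simp at hx; omega
      · exact hv x hx
    simp only [dite_eq_ite] at ih
    obtain ⟨i1, i2, i3, i4, i5⟩ := ih hout' hcv' hv' (by rw [hdiv]; omega) (by intro _; omega)
    refine ⟨i1, i2, i3, i4, ?_⟩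
    rw [i5, pw_pred]
    have hsplit := carry_split carry
    by_cases hm : PySem.Int.mod carry 2 ≠ 0
    · have hm1 : PySem.Int.mod carry 2 = 1 := by rw [hmod] at hm ⊢; omega
      rw [hm1] at hsplit
      simp only [if_pos hm, wt_append, wt_cons, wt_nil]
      have : (carry:ℚ) * pw cv =
          (2 * ((PySem.Int.floordiv carry 2 : Int):ℚ) + 1) * pw cv := by
        rw [hsplit]; push_cast; ring
      rw [this]; ring
    · have hm0 : PySem.Int.mod carry 2 = 0 := by rw [hmod] at hm ⊢; omega
      rw [hm0] at hsplit
      simp only [if_neg hm]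
      have : (carry:ℚ) * pw cv =
          (2 * ((PySem.Int.floordiv carry 2 : Int):ℚ)) * pw cv := by
        rw [hsplit]; push_cast; ring
      rw [this]; ring
  | case2 out carry cv h =>
    exact ⟨hout, hv, hc, fun hpos => by simp only at hpos ⊢; omega, by ring⟩

theorem pvDrain_spec (out : List Int) (carry cv : Int)
    (hout : out.Pairwise (· > ·)) (hcv : ∀ x ∈ out, cv < x) (hc : 0 ≤ carry) :
    (pvDrain out carry cv).Pairwise (· > ·) ∧
      wt (pvDrain out carry cv) = wt out + carry * pw cv := by
  fun_induction pvDrain out carry cv with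
  | case1 out carry cv h ih =>
    have hmod : PySem.Int.mod carry 2 = carry % 2 :=
      PySem.Int.mod_eq_emod_of_pos (by omega : (0:Int) < 2)
    have hdiv : PySem.Int.floordiv carry 2 = carry / 2 :=
      PySem.Int.floordiv_eq_ediv_of_pos (by omega : (0:Int) < 2)
    have hout' : (if PySem.Int.mod carry 2 ≠ 0 then out ++ [cv] else out).Pairwise (· > ·) := by
      split
      · exact pairwise_gt_append hout hcv
      · exact hout
    have hcv' : ∀ x ∈ (if PySem.Int.mod carry 2 ≠ 0 then out ++ [cv] else out), cv - 1 < x := by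
      intro x hx
      split at hx
      · rcases List.mem_append.mp hx with hx | hx
        · have := hcv x hx; omega
        · simp at hx; omega
      · have := hcv x hx; omega
    simp only [dite_eq_ite] at ih
    obtain ⟨i1, i5⟩ := ih hout' hcv' (by rw [hdiv]; omega)
    refine ⟨i1, ?_⟩
    rw [i5, pw_pred]
    have hsplit := carry_split carry
    by_cases hm : PySem.Int.mod carry 2 ≠ 0
    · have hm1 : PySem.Int.mod carry 2 = 1 := by rw [hmod] at hm ⊢; omega
      rw [hm1] at hsplit
      simp only [if_pos hm, wt_append, wt_cons, wt_nil]
      have : (carry:ℚ) * pw cv =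
          (2 * ((PySem.Int.floordiv carry 2 : Int):ℚ) + 1) * pw cv := by
        rw [hsplit]; push_cast; ring
      rw [this]; ring
    · have hm0 : PySem.Int.mod carry 2 = 0 := by rw [hmod] at hm ⊢; omega
      rw [hm0] at hsplit
      simp only [if_neg hm]
      have : (carry:ℚ) * pw cv =
          (2 * ((PySem.Int.floordiv carry 2 : Int):ℚ)) * pw cv := by
        rw [hsplit]; push_cast; ring
      rw [this]; ring
  | case2 out carry cv h =>
    have : carry = 0 := by omega
    subst this
    refine ⟨hout, by simp⟩

-- grouped weight: summing count·pw over a duplicate-free cover of l's values gives wt l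
theorem wt_of_all_eq {m : List Int} {k : Int} (h : ∀ x ∈ m, x = k) :
    wt m = m.length * pw k := by
  induction m with
  | nil => simp [wt_nil]
  | cons a t ih =>
    have ha : a = k := h a List.mem_cons_self
    rw [wt_cons, ih (fun x hx => h x (List.mem_cons_of_mem a hx)), ha]
    simp [List.length_cons]
    ring

theorem sum_count_pw : ∀ (ks l : List Int), ks.Nodup → (∀ x ∈ l, x ∈ ks) →
    (ks.map (fun k => (l.count k : ℚ) * pw k)).sum = wt l := by
  intro ks
  induction ks with
  | nil =>
    intro l _ hcov
    cases l with
    | nil => simp [wt_nil]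
    | cons a t => exact absurd (hcov a List.mem_cons_self) (List.not_mem_nil)
  | cons k ks ih =>
    intro l hnd hcov
    have hperm := List.filter_append_perm (fun x => x == k) l
    have hwl : wt l = wt (l.filter (fun x => x == k)) + wt (l.filter (fun x => !(x == k))) := by
      rw [← wt_perm hperm, wt_append]
    have hwk : wt (l.filter (fun x => x == k)) = (l.count k : ℚ) * pw k := by
      rw [wt_of_all_eq (fun x hx => by
        have := List.of_mem_filter hx
        exact eq_of_beq this)]
      rw [List.count_eq_length_filter]
    have hcnt : ∀ k' ∈ ks, (l.filter (fun x => !(x == k))).count k' = l.count k' := by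
      intro k' hk'
      have hne : k' ≠ k := fun he => (List.nodup_cons.mp hnd).1 (he ▸ hk')
      exact List.count_filter (by simp [hne])
    have hcov' : ∀ x ∈ l.filter (fun x => !(x == k)), x ∈ ks := by
      intro x hx
      have hm := List.mem_of_mem_filter hx
      have hne := List.of_mem_filter hx
      rcases List.mem_cons.mp (hcov x hm) with rfl | h
      · simp at hne
      · exact h
    have hmap : ks.map (fun k' => ((l.count k' : ℚ)) * pw k')
        = ks.map (fun k' => (((l.filter (fun x => !(x == k))).count k' : ℚ)) * pw k') :=
      List.map_congr_left (fun k' hk' => by rw [hcnt k' hk'])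
    rw [List.map_cons, List.sum_cons, hwl, hwk, hmap,
      ih (l.filter (fun x => !(x == k))) (List.nodup_cons.mp hnd).2 hcov']

theorem pvFold_spec (cnt : PySem.Dict Int Int) (ks : List Int) :
    ∀ (out : List Int) (carry cv : Int),
    ks.Pairwise (· > ·) →
    out.Pairwise (· > ·) → (∀ x ∈ out, cv < x) → 0 ≤ carry →
    (0 < carry → ∀ k ∈ ks, k ≤ cv) →
    (∀ k ∈ ks, ∀ x ∈ out, k < x) →
    (∀ k ∈ ks, 0 ≤ cnt.getD k 0) →
    (fun st : List Int × Int × Int =>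
      st.1.Pairwise (· > ·) ∧ (∀ x ∈ st.1, st.2.2 < x) ∧ 0 ≤ st.2.1 ∧
        wt st.1 + st.2.1 * pw st.2.2 =
          wt out + carry * pw cv + (ks.map (fun k => ((cnt.getD k 0 : Int) : ℚ) * pw k)).sum)
    (ks.foldl
      (fun (s : List Int × Int × Int) v =>
        let t := pvCarryDown s.1 s.2.1 s.2.2 v
        let c := cnt.getD v 0 + t.2.1
        let out := if PySem.Int.mod c 2 ≠ 0 then t.1 ++ [v] else t.1
        (out, PySem.Int.floordiv c 2, v - 1))
      (out, carry, cv)) := by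
  induction ks with
  | nil =>
    intro out carry cv _ hout hcv hc _ _ _
    exact ⟨hout, hcv, hc, by simp⟩
  | cons k ks ih =>
    intro out carry cv hks hout hcv hc hk_cv hk_out hcnt
    simp only [List.foldl_cons]
    obtain ⟨i1, i2, i3, i4, i5⟩ := pvCarryDown_spec out carry cv k hout hcv
      (hk_out k List.mem_cons_self) hc (fun hpos => hk_cv hpos k List.mem_cons_self)
    set t := pvCarryDown out carry cv k with ht
    set c : Int := cnt.getD k 0 + t.2.1 with hcdef
    have hcnn : 0 ≤ c := by
      have := hcnt k List.mem_cons_self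
      omega
    have hout' : (if PySem.Int.mod c 2 ≠ 0 then t.1 ++ [k] else t.1).Pairwise (· > ·) := by
      split
      · exact pairwise_gt_append i1 i2
      · exact i1
    have hcv' : ∀ x ∈ (if PySem.Int.mod c 2 ≠ 0 then t.1 ++ [k] else t.1), k - 1 < x := by
      intro x hx
      split at hx
      · rcases List.mem_append.mp hx with hx | hx
        · have := i2 x hx; omega
        · simp at hx; omega
      · have := i2 x hx; omega
    have hks' : ∀ k' ∈ ks, k' < k := fun k' hk' => (List.pairwise_cons.mp hks).1 k' hk'
    have hdiv : PySem.Int.floordiv c 2 = c / 2 :=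
      PySem.Int.floordiv_eq_ediv_of_pos (by omega : (0:Int) < 2)
    have hmod : PySem.Int.mod c 2 = c % 2 :=
      PySem.Int.mod_eq_emod_of_pos (by omega : (0:Int) < 2)
    have := ih (if PySem.Int.mod c 2 ≠ 0 then t.1 ++ [k] else t.1) (PySem.Int.floordiv c 2) (k - 1)
      (List.pairwise_cons.mp hks).2 hout' hcv' (by rw [hdiv]; omega)
      (fun _ k' hk' => by have := hks' k' hk'; omega)
      (fun k' hk' x hx => by have := hcv' x hx; have := hks' k' hk'; omega)
      (fun k' hk' => hcnt k' (List.mem_cons_of_mem k hk'))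
    obtain ⟨j1, j2, j3, j4⟩ := this
    refine ⟨j1, j2, j3, ?_⟩
    rw [j4]
    have hstep : wt (if PySem.Int.mod c 2 ≠ 0 then t.1 ++ [k] else t.1)
        + (PySem.Int.floordiv c 2 : ℚ) * pw (k - 1)
        = wt t.1 + (c : ℚ) * pw k := by
      rw [pw_pred]
      have hsplit := carry_split c
      by_cases hm : PySem.Int.mod c 2 ≠ 0
      · have hm1 : PySem.Int.mod c 2 = 1 := by rw [hmod] at hm ⊢; omega
        rw [hm1] at hsplit
        simp only [if_pos hm, wt_append, wt_cons, wt_nil]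
        have : (c:ℚ) * pw k = (2 * ((PySem.Int.floordiv c 2 : Int):ℚ) + 1) * pw k := by
          rw [hsplit]; push_cast; ring
        rw [this]; ring
      · have hm0 : PySem.Int.mod c 2 = 0 := by rw [hmod] at hm ⊢; omega
        rw [hm0] at hsplit
        simp only [if_neg hm]
        have : (c:ℚ) * pw k = (2 * ((PySem.Int.floordiv c 2 : Int):ℚ)) * pw k := by
          rw [hsplit]; push_cast; ring
        rw [this]; ring
    have hcarrypos : (t.2.1 : ℚ) * pw t.2.2 = (t.2.1 : ℚ) * pw k := by
      rcases lt_or_eq_of_le i3 with hpos | hzero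
      · rw [i4 hpos]
      · rw [← hzero]; simp
    rw [hstep, hcdef]
    push_cast
    rw [List.map_cons, List.sum_cons]
    have := i5
    rw [hcarrypos] at this
    linarith [this]

theorem subnet_crunch_alt_props (l : List Int) :
    (subnet_crunch_alt l).Pairwise (· < ·) ∧ wt (subnet_crunch_alt l) = wt l := by
  unfold subnet_crunch_alt
  rw [PySem.Dict.foldl_insert_getD_add_one_eq_counter]
  set kd := PySem.List.sorted (PySem.Dict.counter l).keys (fun x => x) true with hkd
  have hkeys : (PySem.Dict.counter l).keys = PySem.Set.ofList l := PySem.Dict.keys_counter l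
  have hkdnd : kd.Nodup := by
    rw [hkd, hkeys]
    exact ((PySem.List.sorted_perm _ _ _).nodup_iff).mpr (PySem.Set.nodup_ofList l)
  have hkdge : kd.Pairwise (· ≥ ·) := by
    have := PySem.List.sorted_pairwise_rev (PySem.Dict.counter l).keys (fun x => x)
    simpa [hkd] using this
  have hkdgt : kd.Pairwise (· > ·) := by
    have := hkdge.and hkdnd
    exact this.imp (fun {a b} hab => lt_of_le_of_ne hab.1 (Ne.symm hab.2))
  have hcov : ∀ x ∈ l, x ∈ kd := by
    intro x hx
    rw [hkd, PySem.List.mem_sorted, hkeys, PySem.Set.mem_ofList]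
    exact hx
  obtain ⟨f1, f2, f3, f4⟩ := pvFold_spec (PySem.Dict.counter l) kd [] 0 0 hkdgt
    List.Pairwise.nil (by simp) (le_refl 0) (fun h => absurd h (by omega)) (by simp)
    (fun k _ => by rw [PySem.Dict.getD_counter]; positivity)
  obtain ⟨d1, d2⟩ := pvDrain_spec _ _ _ f1 f2 f3
  constructor
  · rw [List.pairwise_reverse]
    exact d1
  · rw [wt_perm (List.reverse_perm _), d2, f4]
    simp only [wt_nil]
    have hmapeq : kd.map (fun k => (((PySem.Dict.counter l).getD k 0 : Int) : ℚ) * pw k)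
        = kd.map (fun k => (l.count k : ℚ) * pw k) := by
      apply List.map_congr_left
      intro k _
      rw [PySem.Dict.getD_counter]
      push_cast
      ring
    rw [hmapeq, sum_count_pw kd l hkdnd hcov]
    ring

-- ===== VERDICT (by name: the statement is the Claim_ definition above) =====
theorem subnet_crunch_spec : Claim_equal_subnet_crunch := by
  intro l _
  unfold Spec_subnet_crunch
  obtain ⟨ha1, ha2⟩ := subnet_crunch_props l
  obtain ⟨hb1, hb2⟩ := subnet_crunch_alt_props l
  exact wt_inj _ _ ha1 hb1 (by rw [ha2, hb2])
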